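-- pv_equiv track=rewrite | github.com/Sherwin-WU/LSTM-DHHFSP | Dataset.py | get_process_metrix
-- ===== SOURCE A (Python) =====
-- def get_process_metrix(ini_data):
--     max_order_num = ini_data[-1][0]
--     max_set_num = ini_data[-1][1]
--     process_metrix=[]
--
--     for i in range(max_order_num):
--         for j in range(max_set_num):
--             mid_pro_mtx=[]
--             for k in range(len(ini_data)):
--                 if (ini_data[k][0]==i and ini_data[k][1]==j):
--                     mid_pro_mtx.append(ini_data[k])
--             if len(mid_pro_mtx)>0:
--                 now_set_time = mid_pro_mtx[-1][-1]
--                 process_metrix.append([i,j,now_set_time])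
--     return process_metrix
-- ===== SOURCE B (Python) =====
-- def get_process_metrix(ini_data):
--     max_order_num = ini_data[-1][0]
--     max_set_num = ini_data[-1][1]
--     last = {}
--     for row in ini_data:
--         o, s = row[0], row[1]
--         if 0 <= o < max_order_num and 0 <= s < max_set_num:
--             last[(o, s)] = row[-1]
--     return [[o, s, last[(o, s)]] for (o, s) in sorted(last)]
-- ===== Notes on version B (the rewrite author's own statement) =====
-- stated objective: faster
-- what changed: Replaced the max_order*max_set nested enumeration, each cell rescanning the whole input, by a single pass that keeps the last in-range row's time per (order,set) key in a dict, then emits the keys in sorted order.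
-- outside the precondition, e.g. on get_process_metrix([[5], [2, 2]]): A returns [], B raises IndexError
import Mathlib
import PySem

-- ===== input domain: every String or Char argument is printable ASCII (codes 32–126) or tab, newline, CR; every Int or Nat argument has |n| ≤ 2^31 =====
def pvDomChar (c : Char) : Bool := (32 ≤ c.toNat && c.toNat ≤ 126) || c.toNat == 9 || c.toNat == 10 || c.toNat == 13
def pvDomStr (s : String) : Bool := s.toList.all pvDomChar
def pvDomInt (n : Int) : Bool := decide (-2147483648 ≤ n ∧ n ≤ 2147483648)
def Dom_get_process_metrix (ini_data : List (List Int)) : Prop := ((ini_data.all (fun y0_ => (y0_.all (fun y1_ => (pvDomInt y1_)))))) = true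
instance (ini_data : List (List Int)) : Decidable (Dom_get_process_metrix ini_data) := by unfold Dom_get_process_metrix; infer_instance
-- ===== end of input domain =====

-- B replaces A's max_order*max_set nested enumeration (each cell rescanning the whole
-- input) by one pass building a dict of the last in-range row's time per (order,set)
-- key, then emitting the keys in sorted order (objective: faster).

-- ===== PORT A =====
def get_process_metrix (ini_data : List (List Int)) : List (List Int) :=
  match PySem.List.pyGet? ini_data (-1) with
  | none => []  -- ini_data[-1] on the empty list: IndexError (excluded by Pre_)
  | some lastRow =>
    match PySem.List.pyGet? lastRow 0, PySem.List.pyGet? lastRow 1 with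
    | some max_order_num, some max_set_num =>
        (PySem.List.pyRange 0 max_order_num).foldl (fun acc i =>
          (PySem.List.pyRange 0 max_set_num).foldl (fun acc j =>
            let mid_pro_mtx :=
              (PySem.List.pyRange 0 (PySem.List.len ini_data)).foldl (fun m k =>
                if PySem.List.pyGetD (PySem.List.pyGetD ini_data k []) 0 0 == i &&
                   PySem.List.pyGetD (PySem.List.pyGetD ini_data k []) 1 0 == j
                then m ++ [PySem.List.pyGetD ini_data k []] else m) ([] : List (List Int))
            if mid_pro_mtx.length > 0 then
              acc ++ [[i, j, PySem.List.pyGetD (PySem.List.pyGetD mid_pro_mtx (-1) []) (-1) 0]]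
            else acc) acc) []
    | _, _ => []  -- a last row shorter than 2: IndexError (excluded by Pre_)

-- ===== PORT B =====
def get_process_metrix_alt (ini_data : List (List Int)) : List (List Int) :=
  -- ini_data[-1][0] / [1]: exact on Pre_ (Python raises IndexError on the excluded inputs)
  let lastRow := PySem.List.pyGetD ini_data (-1) []
  let max_order_num := PySem.List.pyGetD lastRow 0 0
  let max_set_num := PySem.List.pyGetD lastRow 1 0
  let last : PySem.Dict (Int × Int) Int :=
          ini_data.foldl (fun d row =>
            if 0 ≤ PySem.List.pyGetD row 0 0 ∧ PySem.List.pyGetD row 0 0 < max_order_num ∧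
               0 ≤ PySem.List.pyGetD row 1 0 ∧ PySem.List.pyGetD row 1 0 < max_set_num then
              d.insert (PySem.List.pyGetD row 0 0, PySem.List.pyGetD row 1 0)
                (PySem.List.pyGetD row (-1) 0)
            else d) PySem.Dict.empty
  -- sorted(last) sorts the (o, s) keys, tuples lexicographically;
  -- last[(o, s)] cannot miss (the key is in the dict), so getD is exact there
  (PySem.List.sorted2 last.keys (fun k => k.1) (fun k => k.2)).map
    (fun k => [k.1, k.2, last.getD k 0])

-- ===== PRECONDITION & SPEC =====
-- Pre_ excludes inputs where A (or B) hits an IndexError — the empty list and, for B's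
-- unconditional row[0]/row[1] access, rows shorter than 2; A returns on some of those
-- (a short row whose first entry never falls in range) while B raises, see cites.
def Pre_get_process_metrix (ini_data : List (List Int)) : Prop :=
  ini_data ≠ [] ∧ ∀ row ∈ ini_data, 2 ≤ row.length
instance (ini_data : List (List Int)) : Decidable (Pre_get_process_metrix ini_data) := by
  unfold Pre_get_process_metrix; infer_instance
def pvWitness_get_process_metrix : List (List Int) := [[0, 0, 5], [1, 1]]
def Spec_get_process_metrix (ini_data : List (List Int)) (out : List (List Int)) : Prop := out = get_process_metrix_alt ini_data
instance (ini_data : List (List Int)) (out : List (List Int)) : Decidable (Spec_get_process_metrix ini_data out) := by unfold Spec_get_process_metrix; infer_instance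

-- ===== CLAIM (what is proved, stated in full; the proofs are below) =====
def Claim_equal_get_process_metrix : Prop := ∀ (ini_data : List (List Int)), Dom_get_process_metrix ini_data → Pre_get_process_metrix ini_data → Spec_get_process_metrix ini_data (get_process_metrix ini_data)

-- ===== LEMMAS AND PROOFS =====

-- row projections and the predicates the two programs filter by
def pvMatch (i j : Int) (row : List Int) : Bool :=
  PySem.List.pyGetD row 0 0 == i && PySem.List.pyGetD row 1 0 == j
def pvT (row : List Int) : Int := PySem.List.pyGetD row (-1) 0
def pvQ (M S : Int) (k : Int × Int) (row : List Int) : Bool :=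
  decide (0 ≤ PySem.List.pyGetD row 0 0 ∧ PySem.List.pyGetD row 0 0 < M ∧
          0 ≤ PySem.List.pyGetD row 1 0 ∧ PySem.List.pyGetD row 1 0 < S) &&
  ((PySem.List.pyGetD row 0 0, PySem.List.pyGetD row 1 0) == k)
def pvPairs (M S : Int) : List (Int × Int) :=
  (PySem.List.pyRange 0 M).flatMap (fun i => (PySem.List.pyRange 0 S).map (fun j => (i, j)))
def pvHit (l : List (List Int)) (k : Int × Int) : Bool :=
  decide (0 < (l.filter (pvMatch k.1 k.2)).length)
def pvKs (M S : Int) (l : List (List Int)) : List (Int × Int) :=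
  (pvPairs M S).filter (pvHit l)
def pvDict (M S : Int) (l : List (List Int)) : PySem.Dict (Int × Int) Int :=
  l.foldl (fun d row =>
    if 0 ≤ PySem.List.pyGetD row 0 0 ∧ PySem.List.pyGetD row 0 0 < M ∧
       0 ≤ PySem.List.pyGetD row 1 0 ∧ PySem.List.pyGetD row 1 0 < S then
      d.insert (PySem.List.pyGetD row 0 0, PySem.List.pyGetD row 1 0)
        (PySem.List.pyGetD row (-1) 0)
    else d) PySem.Dict.empty

theorem pyGet?_neg_one {α : Type} (xs : List α) (h : xs ≠ []) :
    PySem.List.pyGet? xs (-1) = some (xs.getLast h) := by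
  have hlen : 0 < xs.length := List.length_pos_iff.mpr h
  simp only [PySem.List.pyGet?, PySem.List.pyIdx?]
  rw [if_neg (by omega), if_pos (by omega)]
  simp only [Option.bind_some, Int.neg_neg, Int.toNat_one]
  rw [List.getLast_eq_getElem, List.getElem?_eq_getElem (by omega)]

-- xs[-1] in Python
theorem pyGetD_neg_one {α : Type} (xs : List α) (d : α) :
    PySem.List.pyGetD xs (-1) d = xs.getLast?.getD d := by
  cases xs with
  | nil => simp [PySem.List.pyGetD, PySem.List.pyGet?, PySem.List.pyIdx?]
  | cons a t =>
    have hne : a :: t ≠ [] := by simp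
    rw [PySem.List.pyGetD, pyGet?_neg_one _ hne, List.getLast?_eq_some_getLast hne]

theorem pyGet?_zero {α : Type} (xs : List α) (h : 0 < xs.length) :
    PySem.List.pyGet? xs 0 = some (xs[0]'h) := by
  simp only [PySem.List.pyGet?, PySem.List.pyIdx?]
  rw [if_pos le_rfl, if_pos (by exact_mod_cast h)]
  simp [List.getElem?_eq_getElem h]

theorem pyGet?_one {α : Type} (xs : List α) (h : 1 < xs.length) :
    PySem.List.pyGet? xs 1 = some (xs[1]'h) := by
  simp only [PySem.List.pyGet?, PySem.List.pyIdx?]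
  rw [if_pos (by omega), if_pos (by exact_mod_cast h)]
  simp [List.getElem?_eq_getElem h]

-- A's inner scan over row indices is a filter of the rows
theorem mid_eq (l : List (List Int)) (i j : Int) :
    (PySem.List.pyRange 0 (PySem.List.len l)).foldl (fun m k =>
      if PySem.List.pyGetD (PySem.List.pyGetD l k []) 0 0 == i &&
         PySem.List.pyGetD (PySem.List.pyGetD l k []) 1 0 == j
      then m ++ [PySem.List.pyGetD l k []] else m) ([] : List (List Int))
    = l.filter (pvMatch i j) := by
  have h := PySem.List.foldl_pyRange_pyGetD l ([] : List Int)
    (fun m row => if PySem.List.pyGetD row 0 0 == i && PySem.List.pyGetD row 1 0 == j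
      then m ++ [row] else m) ([] : List (List Int)) (a := 0) le_rfl
  simp only [Int.toNat_zero, List.drop_zero] at h
  rw [h, PySem.List.foldl_append_if_eq_filter
    (fun row => PySem.List.pyGetD row 0 0 == i && PySem.List.pyGetD row 1 0 == j) l []]
  rfl

theorem ite_append_nil {α : Type} (c : Prop) [Decidable c] (acc x : List α) :
    (if c then acc ++ x else acc) = acc ++ (if c then x else []) := by
  split <;> simp

theorem flatMap_ite_singleton {α β : Type} (l : List α) (c : α → Prop) [DecidablePred c]
    (e : α → β) :
    l.flatMap (fun x => if c x then [e x] else []) =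
      (l.filter (fun x => decide (c x))).map e := by
  induction l with
  | nil => simp
  | cons a t ih =>
    by_cases h : c a <;> simp [h, ih]

theorem flatMap_pairs {β : Type} (M S : Int) (c : Int × Int → Prop) [DecidablePred c]
    (e : Int × Int → β) :
    (PySem.List.pyRange 0 M).flatMap (fun i =>
      (PySem.List.pyRange 0 S).flatMap (fun j => if c (i, j) then [e (i, j)] else []))
    = ((pvPairs M S).filter (fun k => decide (c k))).map e := by
  unfold pvPairs
  rw [List.filter_flatMap, List.map_flatMap]
  refine List.flatMap_congr (fun i _ => ?_)
  rw [List.filter_map, List.map_map, flatMap_ite_singleton _ (fun j => c (i, j)) (fun j => e (i, j))]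
  rfl

-- A in normal form: the lexicographically enumerated hit keys, mapped to rows
theorem portA_eq (l : List (List Int)) (lastRow : List Int) (M S : Int)
    (h1 : PySem.List.pyGet? l (-1) = some lastRow)
    (h2 : PySem.List.pyGet? lastRow 0 = some M)
    (h3 : PySem.List.pyGet? lastRow 1 = some S) :
    get_process_metrix l = (pvKs M S l).map (fun k =>
      [k.1, k.2, PySem.List.pyGetD (PySem.List.pyGetD (l.filter (pvMatch k.1 k.2)) (-1) []) (-1) 0]) := by
  simp only [get_process_metrix, h1, h2, h3]
  simp only [mid_eq]
  simp only [ite_append_nil, PySem.List.foldl_append_eq_flatMap, List.nil_append]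
  rw [flatMap_pairs M S (fun k => (l.filter (pvMatch k.1 k.2)).length > 0)
    (fun k => [k.1, k.2, PySem.List.pyGetD (PySem.List.pyGetD (l.filter (pvMatch k.1 k.2)) (-1) []) (-1) 0])]
  rfl

theorem portB_eq (l : List (List Int)) (lastRow : List Int) (M S : Int)
    (h1 : PySem.List.pyGet? l (-1) = some lastRow)
    (h2 : PySem.List.pyGet? lastRow 0 = some M)
    (h3 : PySem.List.pyGet? lastRow 1 = some S) :
    get_process_metrix_alt l =
      (PySem.List.sorted2 (pvDict M S l).keys (fun k => k.1) (fun k => k.2)).map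
        (fun k => [k.1, k.2, (pvDict M S l).getD k 0]) := by
  have e1 : PySem.List.pyGetD l (-1) [] = lastRow := by
    rw [PySem.List.pyGetD, h1]
    rfl
  have e2 : PySem.List.pyGetD lastRow 0 0 = M := by
    rw [PySem.List.pyGetD, h2]
    rfl
  have e3 : PySem.List.pyGetD lastRow 1 0 = S := by
    rw [PySem.List.pyGetD, h3]
    rfl
  simp only [get_process_metrix_alt, e1, e2, e3]
  rfl

-- the dict after the pass: lookup of k is the last row passing pvQ
theorem dict_get? (M S : Int) (l : List (List Int)) (k : Int × Int) :
    (pvDict M S l).get? k = ((l.filter (pvQ M S k)).getLast?).map pvT := by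
  suffices h : ∀ d : PySem.Dict (Int × Int) Int,
      (l.foldl (fun d row =>
        if 0 ≤ PySem.List.pyGetD row 0 0 ∧ PySem.List.pyGetD row 0 0 < M ∧
           0 ≤ PySem.List.pyGetD row 1 0 ∧ PySem.List.pyGetD row 1 0 < S then
          d.insert (PySem.List.pyGetD row 0 0, PySem.List.pyGetD row 1 0)
            (PySem.List.pyGetD row (-1) 0)
        else d) d).get? k
      = (((l.filter (pvQ M S k)).getLast?).map pvT).or (d.get? k) by
    rw [pvDict, h PySem.Dict.empty]
    simp [PySem.Dict.empty, PySem.Dict.get?]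
  intro d
  induction l using List.reverseRecOn generalizing d with
  | nil => simp
  | append_singleton t r ih =>
    rw [List.foldl_append, List.foldl_cons, List.foldl_nil, List.filter_append]
    by_cases hin : (0 ≤ PySem.List.pyGetD r 0 0 ∧ PySem.List.pyGetD r 0 0 < M ∧
        0 ≤ PySem.List.pyGetD r 1 0 ∧ PySem.List.pyGetD r 1 0 < S)
    · rw [if_pos hin]
      by_cases hk : (PySem.List.pyGetD r 0 0, PySem.List.pyGetD r 1 0) = k
      · have hq : pvQ M S k r = true := by simp [pvQ, hin, hk]
        rw [hk, PySem.Dict.get?_insert_self]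
        simp [hq, List.getLast?_append, pvT]
      · have hq : pvQ M S k r = false := by simp [pvQ, hk]
        rw [PySem.Dict.get?_insert_of_ne (hne := fun h => hk h.symm)]
        simp [hq, ih]
    · rw [if_neg hin]
      have hq : pvQ M S k r = false := by simp [pvQ, hin]
      simp [hq, ih]

theorem keys_insert_nodup {κ ν : Type} [BEq κ] [LawfulBEq κ] (d : PySem.Dict κ ν)
    (k : κ) (v : ν) (h : d.keys.Nodup) : ((d.insert k v).keys).Nodup := by
  unfold PySem.Dict.insert
  split
  · -- overwrite in place: the key list is unchanged
    have : (PySem.Dict.mk (d.items.map (fun p => if p.1 == k then (k, v) else p))).keys = d.keys := by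
      simp only [PySem.Dict.keys, List.map_map]
      refine List.map_congr_left (fun p _ => ?_)
      by_cases hp : p.1 = k <;> simp [hp]
    rwa [this]
  · -- fresh key appended at the end
    rename_i hc
    have hk : k ∉ d.keys := by
      intro hm
      apply hc
      simp only [PySem.Dict.keys, List.mem_map] at hm
      obtain ⟨p, hp, hpk⟩ := hm
      simp only [PySem.Dict.contains, List.any_eq_true]
      exact ⟨p, hp, by simp [hpk]⟩
    have : (PySem.Dict.mk (d.items ++ [(k, v)])).keys = d.keys ++ [k] := by
      simp [PySem.Dict.keys]
    rw [this, List.nodup_append]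
    refine ⟨h, by simp, ?_⟩
    intro a ha b hb
    simp only [List.mem_singleton] at hb
    intro hab
    exact hk ((hab.trans hb) ▸ ha)

theorem mem_keys_iff_get? {κ ν : Type} [BEq κ] [LawfulBEq κ] (d : PySem.Dict κ ν) (k : κ) :
    k ∈ d.keys ↔ (d.get? k).isSome := by
  simp only [PySem.Dict.keys, PySem.Dict.get?, Option.isSome_map, List.find?_isSome,
    List.mem_map, beq_iff_eq]

theorem dict_keys_nodup (M S : Int) (l : List (List Int)) : (pvDict M S l).keys.Nodup := by
  unfold pvDict
  induction l using List.reverseRecOn with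
  | nil => simp [PySem.Dict.empty, PySem.Dict.keys]
  | append_singleton t r ih =>
    rw [List.foldl_append, List.foldl_cons, List.foldl_nil]
    split
    · exact keys_insert_nodup _ _ _ ih
    · exact ih

theorem mem_pvPairs (M S : Int) (k : Int × Int) :
    k ∈ pvPairs M S ↔ (0 ≤ k.1 ∧ k.1 < M) ∧ (0 ≤ k.2 ∧ k.2 < S) := by
  simp only [pvPairs, List.mem_flatMap, List.mem_map, PySem.List.mem_pyRange_one]
  constructor
  · rintro ⟨i, hi, j, hj, rfl⟩
    exact ⟨hi, hj⟩
  · rintro ⟨h1, h2⟩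
    exact ⟨k.1, h1, k.2, h2, rfl⟩

theorem pairwise_pvPairs (M S : Int) :
    (pvPairs M S).Pairwise (fun a b => (toLex a : Int ×ₗ Int) < toLex b) := by
  unfold pvPairs
  rw [List.pairwise_flatMap]
  constructor
  · intro i _
    rw [List.pairwise_map]
    refine (PySem.List.pairwise_lt_pyRange_one 0 S).imp ?_
    intro a b hab
    rw [Prod.Lex.lt_iff]
    exact Or.inr ⟨rfl, hab⟩
  · refine (PySem.List.pairwise_lt_pyRange_one 0 M).imp ?_
    intro i1 i2 h12 x hx y hy
    simp only [List.mem_map] at hx hy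
    obtain ⟨j1, _, rfl⟩ := hx
    obtain ⟨j2, _, rfl⟩ := hy
    rw [Prod.Lex.lt_iff]
    exact Or.inl h12

theorem nodup_pvKs (M S : Int) (l : List (List Int)) : (pvKs M S l).Nodup := by
  refine List.Nodup.filter _ ?_
  refine (pairwise_pvPairs M S).imp ?_
  intro a b hab rfl
  exact lt_irrefl _ hab

theorem pairwise_pvKs (M S : Int) (l : List (List Int)) :
    (pvKs M S l).Pairwise (fun a b => (toLex a : Int ×ₗ Int) < toLex b) := by
  exact (pairwise_pvPairs M S).filter _

-- on an in-range key, the dict pass's predicate is A's match predicate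
theorem pvQ_eq_pvMatch (M S : Int) (k : Int × Int)
    (hb : (0 ≤ k.1 ∧ k.1 < M) ∧ (0 ≤ k.2 ∧ k.2 < S)) (row : List Int) :
    pvQ M S k row = pvMatch k.1 k.2 row := by
  obtain ⟨⟨hb1, hb2⟩, hb3, hb4⟩ := hb
  by_cases h0 : PySem.List.pyGetD row 0 0 = k.1 <;>
    by_cases h1 : PySem.List.pyGetD row 1 0 = k.2 <;>
      simp [pvQ, pvMatch, beq_eq_decide, Prod.ext_iff, h0, h1, hb1, hb2, hb3, hb4]

theorem mem_keys_dict (M S : Int) (l : List (List Int)) (k : Int × Int) :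
    k ∈ (pvDict M S l).keys ↔ k ∈ pvKs M S l := by
  rw [mem_keys_iff_get?, dict_get?]
  constructor
  · intro hs
    have hne : l.filter (pvQ M S k) ≠ [] := by
      intro h0
      rw [h0] at hs
      simp at hs
    obtain ⟨r, hrf⟩ := List.exists_mem_of_ne_nil _ hne
    rw [List.mem_filter] at hrf
    obtain ⟨hrl, hrq⟩ := hrf
    have hq := hrq
    simp only [pvQ, Bool.and_eq_true, decide_eq_true_eq, beq_iff_eq] at hq
    obtain ⟨⟨b1, b2, b3, b4⟩, hkey⟩ := hq
    have hb : (0 ≤ k.1 ∧ k.1 < M) ∧ (0 ≤ k.2 ∧ k.2 < S) := by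
      rw [← hkey]
      exact ⟨⟨b1, b2⟩, b3, b4⟩
    simp only [pvKs, List.mem_filter, mem_pvPairs, pvHit, decide_eq_true_eq]
    refine ⟨hb, ?_⟩
    have hmem : r ∈ l.filter (pvMatch k.1 k.2) := by
      rw [List.mem_filter]
      refine ⟨hrl, ?_⟩
      rw [← pvQ_eq_pvMatch M S k hb]
      exact hrq
    exact List.length_pos_iff.mpr (List.ne_nil_of_mem hmem)
  · intro hk
    simp only [pvKs, List.mem_filter, mem_pvPairs, pvHit, decide_eq_true_eq] at hk
    obtain ⟨hb, hlen⟩ := hk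
    rw [List.filter_congr (fun row _ => pvQ_eq_pvMatch M S k hb row)]
    have hne : l.filter (pvMatch k.1 k.2) ≠ [] := by
      intro h0
      rw [h0] at hlen
      simp at hlen
    cases h : (l.filter (pvMatch k.1 k.2)).getLast? with
    | none => exact absurd (List.getLast?_eq_none_iff.mp h) hne
    | some r => simp

theorem sorted2_eq_sorted_toLex (xs : List (Int × Int)) :
    PySem.List.sorted2 xs (fun k => k.1) (fun k => k.2) =
      PySem.List.sorted xs (fun k => (toLex k : Int ×ₗ Int)) := by
  rw [PySem.List.sorted_eq_foldl_insertBy]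
  show List.foldl (fun acc x => PySem.List.insertBy
    (fun a b => decide (a.1 < b.1) || (!decide (b.1 < a.1) && decide (a.2 < b.2))) x acc) [] xs = _
  have hfun : (fun (a b : Int × Int) => decide (a.1 < b.1) || (!decide (b.1 < a.1) && decide (a.2 < b.2)))
      = (fun (a b : Int × Int) => decide ((toLex a : Int ×ₗ Int) < toLex b)) := by
    funext a b
    by_cases h1 : a.1 < b.1 <;> by_cases h2 : b.1 < a.1 <;> by_cases h3 : a.2 < b.2 <;>
      simp [Prod.Lex.lt_iff, h1, h2, h3] <;> omega
  rw [hfun]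

theorem sorted_keys_eq (M S : Int) (l : List (List Int)) :
    PySem.List.sorted2 (pvDict M S l).keys (fun k => k.1) (fun k => k.2) = pvKs M S l := by
  rw [sorted2_eq_sorted_toLex]
  refine PySem.List.sorted_eq_of_perm_of_pairwise_lt _ _ _ ?_ (pairwise_pvKs M S l)
  refine (List.perm_ext_iff_of_nodup (nodup_pvKs M S l) (dict_keys_nodup M S l)).mpr ?_
  intro a
  exact (mem_keys_dict M S l a).symm

theorem value_eq (M S : Int) (l : List (List Int)) (k : Int × Int) (hk : k ∈ pvKs M S l) :
    (pvDict M S l).getD k 0 =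
      PySem.List.pyGetD (PySem.List.pyGetD (l.filter (pvMatch k.1 k.2)) (-1) []) (-1) 0 := by
  simp only [pvKs, List.mem_filter, mem_pvPairs, pvHit, decide_eq_true_eq] at hk
  obtain ⟨hb, hlen⟩ := hk
  rw [PySem.Dict.getD, dict_get?, List.filter_congr (fun row _ => pvQ_eq_pvMatch M S k hb row)]
  have hne : l.filter (pvMatch k.1 k.2) ≠ [] := by
    intro h0
    rw [h0] at hlen
    simp at hlen
  obtain ⟨r, hr⟩ : ∃ r, (l.filter (pvMatch k.1 k.2)).getLast? = some r := by
    cases h : (l.filter (pvMatch k.1 k.2)).getLast? with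
    | none => exact absurd (List.getLast?_eq_none_iff.mp h) hne
    | some r => exact ⟨r, rfl⟩
  rw [pyGetD_neg_one (l.filter (pvMatch k.1 k.2)) [], hr]
  simp [pvT]

-- ===== VERDICT (by name: the statement is the Claim_ definition above) =====
theorem get_process_metrix_spec : Claim_equal_get_process_metrix := by
  intro l _ hpre
  obtain ⟨hne, hrows⟩ := hpre
  have hlast : PySem.List.pyGet? l (-1) = some (l.getLast hne) := pyGet?_neg_one l hne
  have hlen : 2 ≤ (l.getLast hne).length := hrows _ (List.getLast_mem hne)
  have h2 : PySem.List.pyGet? (l.getLast hne) 0 = some ((l.getLast hne)[0]'(by omega)) :=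
    pyGet?_zero _ (by omega)
  have h3 : PySem.List.pyGet? (l.getLast hne) 1 = some ((l.getLast hne)[1]'(by omega)) :=
    pyGet?_one _ (by omega)
  unfold Spec_get_process_metrix
  rw [portA_eq l _ _ _ hlast h2 h3, portB_eq l _ _ _ hlast h2 h3, sorted_keys_eq]
  exact (List.map_congr_left (fun k hk => by rw [value_eq _ _ _ _ hk])).symm
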